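-- pv_equiv track=rewrite | github.com/pypi-data/pypi-mirror-401 | packages/jira-assistant-skills/jira_assistant_skills-3.0.0.tar.gz/jira_assistant_skills-3.0.0/plugins/jira-assistant-skills/skills/jira-admin/scripts/get_workflow.py | _parse_statuses
-- ===== SOURCE A (Python) =====
-- from typing import Any
--
-- def _parse_statuses(statuses: list[dict[str, Any]]) -> list[dict[str, Any]]:
--     """Parse status list from workflow data."""
--     result = []
--     for status in statuses:
--         result.append(
--             {
--                 "id": status.get("id", ""),
--                 "name": status.get("name", "Unknown"),
--                 "statusCategory": status.get("statusCategory", "UNKNOWN"),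
--                 "statusReference": status.get("statusReference", ""),
--             }
--         )
--
--     # Sort by category: TODO, IN_PROGRESS, DONE
--     category_order = {"TODO": 0, "IN_PROGRESS": 1, "DONE": 2}
--     result.sort(key=lambda s: category_order.get(s["statusCategory"], 99))
--
--     return result
-- ===== SOURCE B (Python) =====
-- def _parse_statuses(statuses):
--     """Parse status list from workflow data (bucket distribution, no sort)."""
--     todo, in_progress, done, other = [], [], [], []
--     for status in statuses:
--         entry = {
--             "id": status.get("id", ""),
--             "name": status.get("name", "Unknown"),
--             "statusCategory": status.get("statusCategory", "UNKNOWN"),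
--             "statusReference": status.get("statusReference", ""),
--         }
--         cat = entry["statusCategory"]
--         if cat == "TODO":
--             todo.append(entry)
--         elif cat == "IN_PROGRESS":
--             in_progress.append(entry)
--         elif cat == "DONE":
--             done.append(entry)
--         else:
--             other.append(entry)
--     return todo + in_progress + done + other
-- ===== Notes on version B (the rewrite author's own statement) =====
-- stated objective: alternative
-- what changed: Replaces the normalize-then-stable-sort-by-category-rank pass with a single loop that distributes each normalized status into one of four ordered buckets (TODO, IN_PROGRESS, DONE, other) and concatenates them, matching the stable sort's order exactly.
import Mathlib
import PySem

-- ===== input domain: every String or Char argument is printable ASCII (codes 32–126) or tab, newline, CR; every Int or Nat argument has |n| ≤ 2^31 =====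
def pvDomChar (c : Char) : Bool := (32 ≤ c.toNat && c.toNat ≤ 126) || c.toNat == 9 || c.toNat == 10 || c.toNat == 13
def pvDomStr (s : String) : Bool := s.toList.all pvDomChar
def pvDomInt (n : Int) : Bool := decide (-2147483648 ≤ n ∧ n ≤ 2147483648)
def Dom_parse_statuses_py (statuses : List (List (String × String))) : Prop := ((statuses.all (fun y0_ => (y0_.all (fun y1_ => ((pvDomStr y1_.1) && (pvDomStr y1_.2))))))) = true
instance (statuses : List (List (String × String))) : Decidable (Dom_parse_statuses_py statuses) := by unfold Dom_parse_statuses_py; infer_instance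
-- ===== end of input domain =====

-- B replaces A's normalize-then-stable-sort-by-category-rank with a single-pass
-- distribution into four ordered buckets (TODO / IN_PROGRESS / DONE / other); same result.


-- ===== PORT A =====
-- the dict literal built in the loop body (shared verbatim by both Pythons)
def pvNorm (status : List (String × String)) : List (String × String) :=
  [("id", PySem.Dict.getD (PySem.Dict.mk status) "id" ""),
   ("name", PySem.Dict.getD (PySem.Dict.mk status) "name" "Unknown"),
   ("statusCategory", PySem.Dict.getD (PySem.Dict.mk status) "statusCategory" "UNKNOWN"),
   ("statusReference", PySem.Dict.getD (PySem.Dict.mk status) "statusReference" "")]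

def pvCategoryOrder : PySem.Dict String Int := PySem.Dict.mk [("TODO", 0), ("IN_PROGRESS", 1), ("DONE", 2)]

-- A's sort key: category_order.get(s["statusCategory"], 99); s["statusCategory"] is totalized
-- with .getD "" — exact here, since the key is applied only to pvNorm dicts, which always carry it.
def pvKeyA (s : List (String × String)) : Int :=
  PySem.Dict.getD pvCategoryOrder ((PySem.Dict.get? (PySem.Dict.mk s) "statusCategory").getD "") 99

def parse_statuses_py (statuses : List (List (String × String))) : List (List (String × String)) :=
  let result := statuses.foldl (fun res status => res ++ [pvNorm status]) []
  PySem.List.sorted result pvKeyA false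

-- ===== PORT B =====
-- B reads entry["statusCategory"], which pvNorm always sets; .getD "" totalizes exactly.
def pvCat (s : List (String × String)) : String :=
  (PySem.Dict.get? (PySem.Dict.mk s) "statusCategory").getD ""

-- the loop body of Source B: append the normalized entry to the bucket chosen by its category
def pvStep (acc : List (List (String × String)) × List (List (String × String)) × List (List (String × String)) × List (List (String × String)))
    (status : List (String × String)) :
    List (List (String × String)) × List (List (String × String)) × List (List (String × String)) × List (List (String × String)) :=
  let entry := pvNorm status
  let cat := pvCat entry
  if cat = "TODO" then (acc.1 ++ [entry], acc.2.1, acc.2.2.1, acc.2.2.2)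
  else if cat = "IN_PROGRESS" then (acc.1, acc.2.1 ++ [entry], acc.2.2.1, acc.2.2.2)
  else if cat = "DONE" then (acc.1, acc.2.1, acc.2.2.1 ++ [entry], acc.2.2.2)
  else (acc.1, acc.2.1, acc.2.2.1, acc.2.2.2 ++ [entry])

def parse_statuses_py_alt (statuses : List (List (String × String))) : List (List (String × String)) :=
  let acc := statuses.foldl pvStep ([], [], [], [])
  acc.1 ++ acc.2.1 ++ acc.2.2.1 ++ acc.2.2.2

-- ===== PRECONDITION & SPEC =====
def Spec_parse_statuses_py (statuses : List (List (String × String))) (out : List (List (String × String))) : Prop := out = parse_statuses_py_alt statuses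
instance (statuses : List (List (String × String))) (out : List (List (String × String))) : Decidable (Spec_parse_statuses_py statuses out) := by unfold Spec_parse_statuses_py; infer_instance

-- ===== CLAIM (what is proved, stated in full; the proofs are below) =====
def Claim_equal_parse_statuses_py : Prop := ∀ (statuses : List (List (String × String))), Dom_parse_statuses_py statuses → Spec_parse_statuses_py statuses (parse_statuses_py statuses)

-- ===== LEMMAS AND PROOFS =====

theorem pvKeyA_eq (s : List (String × String)) :
    pvKeyA s = if pvCat s = "TODO" then 0 else if pvCat s = "IN_PROGRESS" then 1
               else if pvCat s = "DONE" then 2 else 99 := by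
  have h : pvKeyA s = PySem.Dict.getD pvCategoryOrder (pvCat s) 99 := rfl
  rw [h]
  generalize pvCat s = c
  rw [show pvCategoryOrder = PySem.Dict.mk [("TODO", 0), ("IN_PROGRESS", 1), ("DONE", 2)] from rfl]
  simp only [PySem.Dict.getD, PySem.Dict.get?_mk_cons, beq_iff_eq]
  rcases eq_or_ne c "TODO" with h1 | h1
  · simp [h1]
  · rcases eq_or_ne c "IN_PROGRESS" with h2 | h2
    · simp [h2]
    · rcases eq_or_ne c "DONE" with h3 | h3
      · simp [h3]
      · simp [h1, h2, h3, Ne.symm h1, Ne.symm h2, Ne.symm h3, PySem.Dict.get?]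

theorem insertBy_append_not {α : Type} (before : α → α → Bool) (x : α) (A R : List α)
    (h : ∀ y ∈ A, before x y = false) :
    PySem.List.insertBy before x (A ++ R) = A ++ PySem.List.insertBy before x R := by
  induction A with
  | nil => rfl
  | cons a t ih =>
    have ha : before x a = false := h a (by simp)
    simp [PySem.List.insertBy, ha, ih (fun y hy => h y (by simp [hy]))]

theorem insertBy_cons_all {α : Type} (before : α → α → Bool) (x : α) (R : List α)
    (h : ∀ y ∈ R, before x y = true) :
    PySem.List.insertBy before x R = x :: R := by
  cases R with
  | nil => rfl
  | cons a t => simp [PySem.List.insertBy, h a (by simp)]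

-- the stable sort by a key taking only values 0,1,2,99 is the concatenation of the four fibers
theorem sorted_eq_four_filters {α : Type} (key : α → Int) (l : List α)
    (H : ∀ x ∈ l, key x = 0 ∨ key x = 1 ∨ key x = 2 ∨ key x = 99) :
    PySem.List.sorted l key false =
      l.filter (fun a => key a == 0) ++ l.filter (fun a => key a == 1) ++
      l.filter (fun a => key a == 2) ++ l.filter (fun a => key a == 99) := by
  induction l using List.reverseRecOn with
  | nil => rfl
  | append_singleton l x ih =>
    have Hl : ∀ y ∈ l, key y = 0 ∨ key y = 1 ∨ key y = 2 ∨ key y = 99 :=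
      fun y hy => H y (by simp [hy])
    have hx := H x (by simp)
    have hstep : PySem.List.sorted (l ++ [x]) key false =
        PySem.List.insertBy (fun a b => decide (key a < key b)) x
          (PySem.List.sorted l key false) := by
      rw [PySem.List.sorted_eq_foldl_insertBy, PySem.List.sorted_eq_foldl_insertBy,
        List.foldl_append, List.foldl_cons, List.foldl_nil]
    rw [hstep, ih Hl]
    have mem_filter_key : ∀ (v : Int) (y : α), y ∈ l.filter (fun a => key a == v) → key y = v := by
      intro v y hy
      have := List.of_mem_filter hy
      simpa using this
    have not99 : key x = 99 → ∀ y ∈ l.filter (fun a => key a == 99),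
        decide (key x < key y) = false := by
      intro h y hy; have := mem_filter_key 99 y hy; simp [h, this]
    rcases hx with h0 | h1 | h2 | h99
    · -- key x = 0: x goes right after the 0-bucket
      rw [List.append_assoc, List.append_assoc]
      rw [insertBy_append_not _ x (l.filter (fun a => key a == 0)) _
        (by intro y hy; have := mem_filter_key 0 y hy; simp [h0, this])]
      rw [insertBy_cons_all _ x _ (by
        intro y hy
        simp only [List.mem_append] at hy
        rcases hy with hy | hy | hy
        · have := mem_filter_key 1 y hy; simp [h0, this]
        · have := mem_filter_key 2 y hy; simp [h0, this]
        · have := mem_filter_key 99 y hy; simp [h0, this])]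
      simp [List.filter_append, h0, List.append_assoc]
    · -- key x = 1
      rw [List.append_assoc]
      rw [insertBy_append_not _ x (l.filter (fun a => key a == 0) ++ l.filter (fun a => key a == 1)) _
        (by
          intro y hy
          simp only [List.mem_append] at hy
          rcases hy with hy | hy
          · have := mem_filter_key 0 y hy; simp [h1, this]
          · have := mem_filter_key 1 y hy; simp [h1, this])]
      rw [insertBy_cons_all _ x _ (by
        intro y hy
        simp only [List.mem_append] at hy
        rcases hy with hy | hy
        · have := mem_filter_key 2 y hy; simp [h1, this]
        · have := mem_filter_key 99 y hy; simp [h1, this])]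
      simp [List.filter_append, h1, List.append_assoc]
    · -- key x = 2
      rw [insertBy_append_not _ x
        (l.filter (fun a => key a == 0) ++ l.filter (fun a => key a == 1) ++ l.filter (fun a => key a == 2)) _
        (by
          intro y hy
          simp only [List.mem_append] at hy
          rcases hy with (hy | hy) | hy
          · have := mem_filter_key 0 y hy; simp [h2, this]
          · have := mem_filter_key 1 y hy; simp [h2, this]
          · have := mem_filter_key 2 y hy; simp [h2, this])]
      rw [insertBy_cons_all _ x _ (by
        intro y hy; have := mem_filter_key 99 y hy; simp [h2, this])]
      simp [List.filter_append, h2, List.append_assoc]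
    · -- key x = 99: x goes to the very end
      rw [insertBy_append_not _ x
        (l.filter (fun a => key a == 0) ++ l.filter (fun a => key a == 1) ++ l.filter (fun a => key a == 2)) _
        (by
          intro y hy
          simp only [List.mem_append] at hy
          rcases hy with (hy | hy) | hy
          · have := mem_filter_key 0 y hy; simp [h99, this]
          · have := mem_filter_key 1 y hy; simp [h99, this]
          · have := mem_filter_key 2 y hy; simp [h99, this])]
      rw [PySem.List.insertBy_of_forall_not_before _ x _ (not99 h99)]
      simp [List.filter_append, h99, List.append_assoc]

-- A's accumulating loop is map
theorem foldl_append_singleton_eq_map {α β : Type} (f : α → β) (l : List α) (init : List β) :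
    l.foldl (fun res x => res ++ [f x]) init = init ++ l.map f := by
  induction l generalizing init with
  | nil => simp
  | cons a t ih => simp [ih]

-- B's loop: the four buckets are the four filters of the mapped list
theorem alt_foldl_eq_filters (statuses : List (List (String × String)))
    (t i d o : List (List (String × String))) :
    statuses.foldl pvStep (t, i, d, o)
    = (t ++ (statuses.map pvNorm).filter (fun e => pvCat e == "TODO"),
       i ++ (statuses.map pvNorm).filter (fun e => pvCat e == "IN_PROGRESS"),
       d ++ (statuses.map pvNorm).filter (fun e => pvCat e == "DONE"),
       o ++ (statuses.map pvNorm).filter (fun e =>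
          !(pvCat e == "TODO") && !(pvCat e == "IN_PROGRESS") && !(pvCat e == "DONE"))) := by
  induction statuses generalizing t i d o with
  | nil => simp
  | cons s rest ih =>
    rw [List.foldl_cons, List.map_cons, List.filter_cons, List.filter_cons,
      List.filter_cons, List.filter_cons]
    by_cases h0 : pvCat (pvNorm s) = "TODO"
    · rw [show pvStep (t, i, d, o) s = (t ++ [pvNorm s], i, d, o) by simp [pvStep, h0], ih]
      simp [h0, List.append_assoc]
    · by_cases h1 : pvCat (pvNorm s) = "IN_PROGRESS"
      · rw [show pvStep (t, i, d, o) s = (t, i ++ [pvNorm s], d, o) by simp [pvStep, h0, h1], ih]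
        simp [h0, h1, List.append_assoc]
      · by_cases h2 : pvCat (pvNorm s) = "DONE"
        · rw [show pvStep (t, i, d, o) s = (t, i, d ++ [pvNorm s], o) by
            simp [pvStep, h0, h1, h2], ih]
          simp [h0, h1, h2, List.append_assoc]
        · rw [show pvStep (t, i, d, o) s = (t, i, d, o ++ [pvNorm s]) by
            simp [pvStep, h0, h1, h2], ih]
          simp [h0, h1, h2, List.append_assoc]

-- ===== VERDICT (by name: the statement is the Claim_ definition above) =====
theorem parse_statuses_py_spec : Claim_equal_parse_statuses_py := by
  intro statuses _
  unfold Spec_parse_statuses_py parse_statuses_py parse_statuses_py_alt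
  rw [foldl_append_singleton_eq_map, List.nil_append]
  rw [alt_foldl_eq_filters]
  simp only [List.nil_append]
  have hkeys : ∀ x ∈ statuses.map pvNorm,
      pvKeyA x = 0 ∨ pvKeyA x = 1 ∨ pvKeyA x = 2 ∨ pvKeyA x = 99 := by
    intro x _
    rw [pvKeyA_eq]; split_ifs <;> simp
  rw [sorted_eq_four_filters pvKeyA _ hkeys]
  congr 1
  · congr 1
    · congr 1
      · apply List.filter_congr; intro x _; rw [pvKeyA_eq]; split_ifs <;> simp_all
      · apply List.filter_congr; intro x _; rw [pvKeyA_eq]; split_ifs <;> simp_all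
    · apply List.filter_congr; intro x _; rw [pvKeyA_eq]; split_ifs <;> simp_all
  · apply List.filter_congr; intro x _; rw [pvKeyA_eq]; split_ifs <;> simp_all
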